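-- pv_equiv track=rewrite | github.com/Sixline/VortexDM | vdm/tkview.py | auto_num
-- ===== SOURCE A (Python) =====
-- def auto_num(titles, reverse=False, startnum=0, startitem=0, zeropadding=True, enable=True, **kwargs):
--     if enable:
--         startnum = startnum or (len(titles) if reverse else 1)
--         startitem = startitem or 1
--         result = []
--
--         maxnum = len(titles)
--         paddingwidth = len(str(maxnum))
--         n = startnum
--         for i, title in enumerate(titles):
--             itemnum = i + 1
--
--             if itemnum >= startitem and n > 0:
--                 num = str(n).zfill(paddingwidth) if zeropadding else n
--                 title = f'{num}-{title}'
--                 n = n - 1 if reverse else n + 1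
--
--             result.append(title)
--     else:
--         result = titles
--     return result
-- ===== SOURCE B (Python) =====
-- def auto_num(titles, reverse=False, startnum=0, startitem=0, zeropadding=True, enable=True, **kwargs):
--     if not enable:
--         return titles
--     s0 = startnum or (len(titles) if reverse else 1)
--     base = max((startitem or 1) - 1, 0)
--     width = len(str(len(titles)))
--
--     def num_at(i):
--         # closed-form number for 0-based index i, or None if this item is unnumbered
--         k = i - base
--         if k < 0:
--             return None
--         num = s0 - k if reverse else s0 + k
--         return num if (num > 0 if reverse else s0 > 0) else None
--
--     return [t if num_at(i) is None
--             else f'{str(num_at(i)).zfill(width) if zeropadding else num_at(i)}-{t}'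
--             for i, t in enumerate(titles)]
-- ===== Notes on version B (the rewrite author's own statement) =====
-- stated objective: simpler
-- what changed: A's sequential fold maintaining a sticky running counter n and an accumulator list is replaced by a stateless map over enumerate(titles) that computes each item's number in closed form from its index (forward: startnum+k if startnum>0; reverse: startnum-k while positive).
import Mathlib
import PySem

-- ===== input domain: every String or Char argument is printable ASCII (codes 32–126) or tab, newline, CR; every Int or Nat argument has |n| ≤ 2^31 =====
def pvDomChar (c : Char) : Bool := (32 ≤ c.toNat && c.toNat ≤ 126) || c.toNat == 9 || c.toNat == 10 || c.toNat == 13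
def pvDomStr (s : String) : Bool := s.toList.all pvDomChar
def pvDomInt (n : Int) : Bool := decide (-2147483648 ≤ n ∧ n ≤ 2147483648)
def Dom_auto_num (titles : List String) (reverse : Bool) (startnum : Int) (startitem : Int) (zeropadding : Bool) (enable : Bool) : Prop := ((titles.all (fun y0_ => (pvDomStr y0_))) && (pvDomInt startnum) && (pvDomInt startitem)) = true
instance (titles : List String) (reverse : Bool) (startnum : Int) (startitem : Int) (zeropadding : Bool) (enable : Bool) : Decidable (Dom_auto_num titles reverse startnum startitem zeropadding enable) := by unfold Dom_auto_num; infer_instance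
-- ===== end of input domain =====

-- B replaces A's running counter/accumulator fold by a per-index closed-form numbering mapped
-- over enumerate (objective: simpler decomposition, same cost).

-- ===== PORT A =====
-- loop body of A's for-loop, as a fold step over (counter n, result)
def autoNumStep (reverse zeropadding : Bool) (startitem paddingwidth : Int)
    (st : Int × List String) (p : Int × String) : Int × List String :=
  let n := st.1
  let result := st.2
  let i := p.1
  let title := p.2
  let itemnum := i + 1
  if itemnum ≥ startitem ∧ n > 0 then
    let num : String := if zeropadding then PySem.Str.zfill (PySem.Int.toStr n) paddingwidth
                        else PySem.Int.toStr n
    ((if reverse then n - 1 else n + 1), result ++ [num ++ "-" ++ title])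
  else
    (n, result ++ [title])

def auto_num (titles : List String) (reverse : Bool) (startnum : Int) (startitem : Int) (zeropadding : Bool) (enable : Bool) : List String :=
  if enable then
    let startnum' : Int := if startnum ≠ 0 then startnum else (if reverse then (titles.length : Int) else 1)
    let startitem' : Int := if startitem ≠ 0 then startitem else 1
    let maxnum : Int := (titles.length : Int)
    let paddingwidth : Int := PySem.Str.len (PySem.Int.toStr maxnum)
    ((PySem.List.enumerate titles 0).foldl
        (autoNumStep reverse zeropadding startitem' paddingwidth) (startnum', [])).2
  else titles

-- ===== PORT B =====
-- closed-form number for the 0-based index i, none = item keeps its title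
def altNumAt (reverse : Bool) (s0 base : Int) (i : Int) : Option Int :=
  let k := i - base
  if k < 0 then none
  else
    let num := if reverse then s0 - k else s0 + k
    if (if reverse then num > 0 else s0 > 0) then some num else none

def altLabel (reverse zeropadding : Bool) (s0 base width : Int) (p : Int × String) : String :=
  match altNumAt reverse s0 base p.1 with
  | none => p.2
  | some m => (if zeropadding then PySem.Str.zfill (PySem.Int.toStr m) width
               else PySem.Int.toStr m) ++ "-" ++ p.2

def auto_num_alt (titles : List String) (reverse : Bool) (startnum : Int) (startitem : Int) (zeropadding : Bool) (enable : Bool) : List String :=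
  if enable then
    let s0 : Int := if startnum ≠ 0 then startnum else (if reverse then (titles.length : Int) else 1)
    let base : Int := max ((if startitem ≠ 0 then startitem else 1) - 1) 0
    let width : Int := PySem.Str.len (PySem.Int.toStr (titles.length : Int))
    (PySem.List.enumerate titles 0).map (altLabel reverse zeropadding s0 base width)
  else titles

-- ===== PRECONDITION & SPEC =====
def Spec_auto_num (titles : List String) (reverse : Bool) (startnum : Int) (startitem : Int) (zeropadding : Bool) (enable : Bool) (out : List String) : Prop := out = auto_num_alt titles reverse startnum startitem zeropadding enable
instance (titles : List String) (reverse : Bool) (startnum : Int) (startitem : Int) (zeropadding : Bool) (enable : Bool) (out : List String) : Decidable (Spec_auto_num titles reverse startnum startitem zeropadding enable out) := by unfold Spec_auto_num; infer_instance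

-- ===== CLAIM (what is proved, stated in full; the proofs are below) =====
def Claim_equal_auto_num : Prop := ∀ (titles : List String) (reverse : Bool) (startnum : Int) (startitem : Int) (zeropadding : Bool) (enable : Bool), Dom_auto_num titles reverse startnum startitem zeropadding enable → Spec_auto_num titles reverse startnum startitem zeropadding enable (auto_num titles reverse startnum startitem zeropadding enable)

-- ===== LEMMAS AND PROOFS =====

-- the value of A's counter n when the loop reaches 0-based index j
def counterAt (reverse : Bool) (s0 base j : Int) : Int :=
  if s0 ≤ 0 then s0
  else if reverse then max (s0 - max (j - base) 0) 0
  else s0 + max (j - base) 0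

lemma autoNumStep_eq (reverse zeropadding : Bool) (si w s0 : Int) (acc : List String)
    (j : Int) (t : String) (hj : 0 ≤ j) :
    autoNumStep reverse zeropadding si w (counterAt reverse s0 (max (si - 1) 0) j, acc) (j, t)
      = (counterAt reverse s0 (max (si - 1) 0) (j + 1),
         acc ++ [altLabel reverse zeropadding s0 (max (si - 1) 0) w (j, t)]) := by
  set n := counterAt reverse s0 (max (si - 1) 0) j with hn
  unfold counterAt at hn
  unfold autoNumStep
  by_cases hg : j + 1 ≥ si ∧ n > 0
  · have hk : altNumAt reverse s0 (max (si - 1) 0) j = some n := by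
      unfold altNumAt
      rcases reverse <;>
        · simp only [Bool.false_eq_true, if_false, if_true] at hn ⊢
          split_ifs at hn ⊢ <;> (congr 1; omega)
    simp only [ge_iff_le, gt_iff_lt] at hg
    rw [if_pos (by exact ⟨hg.1, hg.2⟩)]
    simp only [altLabel, hk, Prod.mk.injEq]
    refine ⟨?_, trivial⟩
    unfold counterAt
    rcases reverse <;>
      · simp only [Bool.false_eq_true, if_false, if_true] at hn ⊢
        split_ifs at hn ⊢ <;> omega
  · have hk : altNumAt reverse s0 (max (si - 1) 0) j = none := by
      unfold altNumAt
      rcases reverse <;>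
        · simp only [Bool.false_eq_true, if_false, if_true] at hn ⊢
          split_ifs at hn ⊢ <;> first | rfl | (exfalso; revert hg; simp only [ge_iff_le, gt_iff_lt, not_and, not_lt]; omega)
    rw [if_neg hg]
    simp only [altLabel, hk, Prod.mk.injEq]
    refine ⟨?_, trivial⟩
    unfold counterAt
    simp only [ge_iff_le, gt_iff_lt, not_and, not_lt] at hg
    rcases reverse <;>
      · simp only [Bool.false_eq_true, if_false, if_true] at hn ⊢
        split_ifs at hn ⊢ <;> omega

lemma core (reverse zeropadding : Bool) (s0 si w : Int) :
    ∀ (l : List String) (j : Int) (acc : List String), 0 ≤ j →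
    ((PySem.List.enumerate l j).foldl (autoNumStep reverse zeropadding si w)
        (counterAt reverse s0 (max (si - 1) 0) j, acc)).2
      = acc ++ (PySem.List.enumerate l j).map (altLabel reverse zeropadding s0 (max (si - 1) 0) w) := by
  intro l
  induction l with
  | nil => intro j acc _; simp [PySem.List.enumerate_nil]
  | cons t rest ih =>
    intro j acc hj
    rw [PySem.List.enumerate_cons]
    simp only [List.foldl_cons, List.map_cons]
    rw [autoNumStep_eq reverse zeropadding si w s0 acc j t hj, ih (j + 1) _ (by omega)]
    simp

theorem auto_num_spec_aux (titles : List String) (reverse : Bool) (startnum : Int) (startitem : Int) (zeropadding : Bool) (enable : Bool) :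
    auto_num titles reverse startnum startitem zeropadding enable
      = auto_num_alt titles reverse startnum startitem zeropadding enable := by
  unfold auto_num auto_num_alt
  cases enable with
  | false => rfl
  | true =>
    simp only [if_true]
    set s0 : Int := if startnum ≠ 0 then startnum else (if reverse then (titles.length : Int) else 1) with hs0
    set si : Int := if startitem ≠ 0 then startitem else 1 with hsi
    set w : Int := PySem.Str.len (PySem.Int.toStr (titles.length : Int)) with hw
    have h0 : counterAt reverse s0 (max (si - 1) 0) 0 = s0 := by
      unfold counterAt; split_ifs <;> omega
    have := core reverse zeropadding s0 si w titles 0 [] le_rfl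
    rw [h0] at this
    simpa using this

-- ===== VERDICT (by name: the statement is the Claim_ definition above) =====
theorem auto_num_spec : Claim_equal_auto_num := by
  intro titles reverse startnum startitem zeropadding enable _
  unfold Spec_auto_num
  exact auto_num_spec_aux titles reverse startnum startitem zeropadding enable
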